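-- pv_equiv track=rewrite | github.com/jeffs-brain/memory | sdks/py/src/jeffs_brain_memory/retrieval/temporal.py | _collect_left_phrase
-- ===== SOURCE A (Python) =====
-- PHRASE_PROBE_MIN_TOKENS = 2
--
-- PHRASE_PROBE_MAX_TOKENS = 4
--
-- PHRASE_PROBE_BOUNDARY_WORDS: frozenset[str] = frozenset(
--     {
--         "a", "an", "the", "and", "or", "plus",
--         "for", "with", "what", "who", "when", "where", "why", "how",
--         "did", "does", "do", "was", "were", "is", "are", "am",
--         "you", "your", "about", "this", "that", "these", "those",
--         "have", "has", "had", "from", "into", "than", "then", "them", "they", "their",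
--         "i", "me", "my", "we", "our", "us", "it", "if", "to", "of", "on", "in", "at", "by",
--         "amount", "total", "all", "list",
--         "finally", "decided", "decide", "wondering", "wonder",
--         "remembered", "remember", "thinking", "back", "previous", "conversation",
--         "can", "could", "would", "should", "remind", "follow", "specific", "exact",
--         "spent", "spend", "bought", "buy", "ordered", "order",
--         "purchased", "purchase", "paid", "pay", "submitted", "submit",
--         "many", "much", "long",
--         "last", "today", "yesterday", "tomorrow", "week", "month", "year",
--         "monday", "tuesday", "wednesday", "thursday", "friday", "saturday", "sunday",
--     }
-- )
--
-- def _join_phrase_tokens(tokens: list[str]) -> str | None: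
--     if len(tokens) < PHRASE_PROBE_MIN_TOKENS:
--         return None
--     return " ".join(tokens)
--
-- def _collect_left_phrase(tokens: list[str]) -> str | None:
--     if not tokens:
--         return None
--     collected: list[str] = []
--     for token in reversed(tokens):
--         if token in PHRASE_PROBE_BOUNDARY_WORDS:
--             if collected:
--                 break
--             continue
--         if len(token) < 2 or any(ch.isdigit() for ch in token):
--             if collected:
--                 break
--             continue
--         collected.append(token)
--         if len(collected) >= PHRASE_PROBE_MAX_TOKENS:
--             break
--     collected.reverse()
--     return _join_phrase_tokens(collected)
-- ===== SOURCE B (Python) =====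
-- PHRASE_PROBE_MIN_TOKENS = 2
--
-- PHRASE_PROBE_MAX_TOKENS = 4
--
-- PHRASE_PROBE_BOUNDARY_WORDS: frozenset[str] = frozenset(
--     {
--         "a", "an", "the", "and", "or", "plus",
--         "for", "with", "what", "who", "when", "where", "why", "how",
--         "did", "does", "do", "was", "were", "is", "are", "am",
--         "you", "your", "about", "this", "that", "these", "those",
--         "have", "has", "had", "from", "into", "than", "then", "them", "they", "their",
--         "i", "me", "my", "we", "our", "us", "it", "if", "to", "of", "on", "in", "at", "by",
--         "amount", "total", "all", "list",
--         "finally", "decided", "decide", "wondering", "wonder",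
--         "remembered", "remember", "thinking", "back", "previous", "conversation",
--         "can", "could", "would", "should", "remind", "follow", "specific", "exact",
--         "spent", "spend", "bought", "buy", "ordered", "order",
--         "purchased", "purchase", "paid", "pay", "submitted", "submit",
--         "many", "much", "long",
--         "last", "today", "yesterday", "tomorrow", "week", "month", "year",
--         "monday", "tuesday", "wednesday", "thursday", "friday", "saturday", "sunday",
--     }
-- )
--
--
-- def _is_bad(token: str) -> bool:
--     """Boundary words and invalid tokens end (or precede) the phrase alike."""
--     return (
--         token in PHRASE_PROBE_BOUNDARY_WORDS
--         or len(token) < 2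
--         or any(ch.isdigit() for ch in token)
--     )
--
--
-- def _collect_left_phrase(tokens: list[str]) -> str | None:
--     # Single FORWARD pass (no reversal): remember the boundaries [s, e) of the
--     # good-token run that ends at the last good token; `cur` is the index just
--     # after the most recent bad token, i.e. the start of the current good run.
--     s = 0
--     e = -1
--     cur = 0
--     for idx, t in enumerate(tokens):
--         if _is_bad(t):
--             cur = idx + 1
--         else:
--             s = cur
--             e = idx + 1
--     if e < 0:
--         return None
--     run = tokens[max(s, e - PHRASE_PROBE_MAX_TOKENS):e]
--     if len(run) < PHRASE_PROBE_MIN_TOKENS: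
--         return None
--     return " ".join(run)
-- ===== Notes on version B (the rewrite author's own statement) =====
-- stated objective: alternative
-- what changed: Replaces A's backward scan over reversed(tokens) (skip bad, then collect up to 4 with an accumulator and a collected-flag) by a single forward pass that only tracks the [start,end) boundaries of the good-token run ending at the last good token, then slices the last min(4,len) tokens of that run straight out of the original list in forward order. (B scans the whole list where A may stop early; same asymptotic cost).
import Mathlib
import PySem

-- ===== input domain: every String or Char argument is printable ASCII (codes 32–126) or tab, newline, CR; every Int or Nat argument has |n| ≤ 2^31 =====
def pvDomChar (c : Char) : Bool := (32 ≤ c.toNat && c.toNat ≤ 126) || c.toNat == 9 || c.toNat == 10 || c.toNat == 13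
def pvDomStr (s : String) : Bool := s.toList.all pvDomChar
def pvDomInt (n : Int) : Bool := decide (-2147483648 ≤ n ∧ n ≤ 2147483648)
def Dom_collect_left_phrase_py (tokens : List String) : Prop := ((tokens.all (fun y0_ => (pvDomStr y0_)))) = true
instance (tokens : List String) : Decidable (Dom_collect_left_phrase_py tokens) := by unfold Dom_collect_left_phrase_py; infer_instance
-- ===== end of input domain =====

-- B replaces A's backward scan over reversed(tokens) by a single forward pass that tracks the
-- [start, end) boundaries of the last good-token run, then slices it from the original list
-- (alternative decomposition; same asymptotic cost, A may early-exit).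

-- shared module constant PHRASE_PROBE_BOUNDARY_WORDS (a frozenset of distinct literals)
def phraseBoundaryWords : List String :=
  ["a", "an", "the", "and", "or", "plus",
   "for", "with", "what", "who", "when", "where", "why", "how",
   "did", "does", "do", "was", "were", "is", "are", "am",
   "you", "your", "about", "this", "that", "these", "those",
   "have", "has", "had", "from", "into", "than", "then", "them", "they", "their",
   "i", "me", "my", "we", "our", "us", "it", "if", "to", "of", "on", "in", "at", "by",
   "amount", "total", "all", "list",
   "finally", "decided", "decide", "wondering", "wonder",
   "remembered", "remember", "thinking", "back", "previous", "conversation",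
   "can", "could", "would", "should", "remind", "follow", "specific", "exact",
   "spent", "spend", "bought", "buy", "ordered", "order",
   "purchased", "purchase", "paid", "pay", "submitted", "submit",
   "many", "much", "long",
   "last", "today", "yesterday", "tomorrow", "week", "month", "year",
   "monday", "tuesday", "wednesday", "thursday", "friday", "saturday", "sunday"]

-- ===== PORT A =====

-- _join_phrase_tokens
def joinPhraseTokensA (tokens : List String) : Option String :=
  if tokens.length < 2 then none else some (PySem.Str.join " " tokens)

-- the 'for token in reversed(tokens)' loop, state = collected
def collectLoopA : List String → List String → List String
  | [], collected => collected
  | token :: rest, collected =>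
    if phraseBoundaryWords.contains token then
      if collected ≠ [] then collected else collectLoopA rest collected
    else if PySem.Str.len token < 2 || token.toList.any PySem.Chars.isdigit then
      if collected ≠ [] then collected else collectLoopA rest collected
    else
      let c := collected ++ [token]
      if 4 ≤ c.length then c else collectLoopA rest c

def collect_left_phrase_py (tokens : List String) : Option String :=
  if tokens = [] then none
  else
    let collected := collectLoopA tokens.reverse []
    joinPhraseTokensA collected.reverse

-- ===== PORT B =====

-- _is_bad
def isBadToken (t : String) : Bool :=
  phraseBoundaryWords.contains t || PySem.Str.len t < 2 || t.toList.any PySem.Chars.isdigit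

-- body of 'for idx, t in enumerate(tokens)', state = (s, e, cur)
def bStep (st : Int × Int × Int) (p : Int × String) : Int × Int × Int :=
  match st, p with
  | (s, e, cur), (idx, t) =>
    if isBadToken t then (s, e, idx + 1) else (cur, idx + 1, cur)

def collect_left_phrase_py_alt (tokens : List String) : Option String :=
  let st := (PySem.List.enumerate tokens 0).foldl bStep (0, -1, 0)
  if st.2.1 < 0 then none
  else
    let run := PySem.List.slice tokens (some (max st.1 (st.2.1 - 4))) (some st.2.1)
    if run.length < 2 then none
    else some (PySem.Str.join " " run)

-- ===== PRECONDITION & SPEC =====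
def Spec_collect_left_phrase_py (tokens : List String) (out : Option String) : Prop := out = collect_left_phrase_py_alt tokens
instance (tokens : List String) (out : Option String) : Decidable (Spec_collect_left_phrase_py tokens out) := by unfold Spec_collect_left_phrase_py; infer_instance

-- ===== CLAIM (what is proved, stated in full; the proofs are below) =====
def Claim_equal_collect_left_phrase_py : Prop := ∀ (tokens : List String), Dom_collect_left_phrase_py tokens → Spec_collect_left_phrase_py tokens (collect_left_phrase_py tokens)

-- ===== LEMMAS AND PROOFS =====

-- A-side characterization (same as a direct unfold of the loop)
theorem collectLoopA_cons (t : String) (r c : List String) :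
    collectLoopA (t :: r) c =
      if isBadToken t then (if c ≠ [] then c else collectLoopA r c)
      else (if 4 ≤ (c ++ [t]).length then c ++ [t] else collectLoopA r (c ++ [t])) := by
  simp only [collectLoopA, isBadToken, Bool.or_eq_true]
  split_ifs <;> first | rfl | tauto

theorem collectLoopA_acc (r c : List String) (hne : c ≠ []) (hlt : c.length < 4) :
    collectLoopA r c = c ++ (r.takeWhile (fun t => !isBadToken t)).take (4 - c.length) := by
  induction r generalizing c with
  | nil => simp [collectLoopA]
  | cons t r ih =>
    rw [collectLoopA_cons]
    by_cases hb : isBadToken t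
    · simp [hb, hne]
    · simp only [hb, List.takeWhile_cons, Bool.not_false, if_true]
      by_cases h4 : 4 ≤ (c ++ [t]).length
      · have hc3 : c.length = 3 := by simp at h4 ⊢; omega
        simp [hc3]
      · have : (c ++ [t]).length < 4 := by omega
        rw [if_neg h4, ih (c ++ [t]) (by simp) this]
        have h1 : 4 - c.length = (4 - (c ++ [t]).length) + 1 := by simp at h4 ⊢; omega
        simp [h1]

theorem collectLoopA_nil_acc (r : List String) :
    collectLoopA r [] =
      ((r.dropWhile isBadToken).takeWhile (fun t => !isBadToken t)).take 4 := by
  induction r with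
  | nil => simp [collectLoopA]
  | cons t r ih =>
    rw [collectLoopA_cons]
    by_cases hb : isBadToken t
    · simpa [hb, List.dropWhile_cons] using ih
    · rw [if_neg hb]
      have h4 : ¬ (4 ≤ (([] : List String) ++ [t]).length) := by simp
      rw [if_neg h4]
      simp only [List.nil_append]
      rw [collectLoopA_acc r [t] (by simp) (by simp)]
      simp [hb, List.take_succ_cons]

-- B-side loop invariant, by reverse (snoc) induction
theorem bLoop_spec (tokens : List String) :
    (PySem.List.enumerate tokens 0).foldl bStep (0, -1, 0) =
      ( (if (tokens.reverse.dropWhile isBadToken) = [] then 0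
         else (tokens.length : Int) - (tokens.reverse.takeWhile isBadToken).length
              - ((tokens.reverse.dropWhile isBadToken).takeWhile (fun t => !isBadToken t)).length),
        (if (tokens.reverse.dropWhile isBadToken) = [] then (-1 : Int)
         else (tokens.length : Int) - (tokens.reverse.takeWhile isBadToken).length),
        (tokens.length : Int) - (tokens.reverse.takeWhile (fun t => !isBadToken t)).length ) := by
  induction tokens using List.reverseRecOn with
  | nil => simp [PySem.List.enumerate]
  | append_singleton l t ih =>
    rw [PySem.List.enumerate_append, List.foldl_append, ih]
    by_cases hb : isBadToken t
    · simp [PySem.List.enumerate, bStep, hb]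
    · simp [PySem.List.enumerate, bStep, hb]

-- forward slice of the trailing good run = reversed take-4 of the reversed-order run
theorem slice_run_eq (tokens : List String) :
    PySem.List.slice tokens
      (some (max ((tokens.length : Int) - (tokens.reverse.takeWhile isBadToken).length
                    - ((tokens.reverse.dropWhile isBadToken).takeWhile (fun t => !isBadToken t)).length)
                 (((tokens.length : Int) - (tokens.reverse.takeWhile isBadToken).length) - 4)))
      (some ((tokens.length : Int) - (tokens.reverse.takeWhile isBadToken).length)) =
    (((tokens.reverse.dropWhile isBadToken).takeWhile (fun t => !isBadToken t)).take 4).reverse := by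
  set rev := tokens.reverse with hrev
  set bw := rev.takeWhile isBadToken
  set dw := rev.dropWhile isBadToken
  set G := dw.takeWhile (fun t => !isBadToken t)
  set R := dw.dropWhile (fun t => !isBadToken t)
  have hsplit : bw ++ dw = rev := List.takeWhile_append_dropWhile
  have hGR : G ++ R = dw := List.takeWhile_append_dropWhile
  have hn : bw.length + dw.length = tokens.length := by
    have := congrArg List.length hsplit
    simpa [hrev] using this
  have hGle : G.length + R.length = dw.length := by
    have := congrArg List.length hGR
    simpa using this
  set m := min G.length 4 with hm
  set a := tokens.length - bw.length - m with ha
  have ha' : a = R.length + (G.length - 4) := by omega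
  -- the Int bounds are the casts of the Nat bounds a and tokens.length - bw.length
  have hmax : (max ((tokens.length : Int) - bw.length - G.length)
                   (((tokens.length : Int) - bw.length) - 4)) = (a : Int) := by
    rcases Nat.le_total G.length 4 with h | h <;> push_cast [ha] <;> omega
  have he : ((tokens.length : Int) - bw.length) = ((tokens.length - bw.length : Nat) : Int) := by
    omega
  rw [hmax, he, PySem.List.slice_natCast]
  have hbm : tokens.length - bw.length - a = m := by omega
  rw [hbm]
  -- tokens = dw.reverse ++ bw.reverse
  have htok : tokens = dw.reverse ++ bw.reverse := by
    have : tokens = rev.reverse := by simp [hrev]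
    rw [this, ← hsplit, List.reverse_append]
  -- dw.reverse = R.reverse ++ G.reverse
  have hdwrev : dw.reverse = R.reverse ++ G.reverse := by
    rw [← hGR, List.reverse_append]
  have hale : a ≤ dw.reverse.length := by simp; omega
  rw [htok, List.drop_append_of_le_length hale, hdwrev]
  have hdropped : (R.reverse ++ G.reverse).drop a = G.reverse.drop (G.length - 4) := by
    rw [ha']
    have : R.length + (G.length - 4) = R.reverse.length + (G.length - 4) := by simp
    rw [this, List.drop_append]
    simp
  rw [hdropped]
  have hlen : (G.reverse.drop (G.length - 4)).length = m := by simp; omega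
  rw [List.take_append_of_le_length (by omega : m ≤ (G.reverse.drop (G.length - 4)).length)]
  rw [List.take_of_length_le (by omega : (G.reverse.drop (G.length - 4)).length ≤ m)]
  rw [List.reverse_take]

-- ===== VERDICT (by name: the statement is the Claim_ definition above) =====
theorem collect_left_phrase_py_spec : Claim_equal_collect_left_phrase_py := by
  intro tokens _
  unfold Spec_collect_left_phrase_py collect_left_phrase_py collect_left_phrase_py_alt
  rw [bLoop_spec, collectLoopA_nil_acc]
  by_cases hd : tokens.reverse.dropWhile isBadToken = []
  · -- no good token at all: both sides are none
    simp only [hd]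
    simp [joinPhraseTokensA]
  · have htne : tokens ≠ [] := by
      intro h; subst h; simp at hd
    have hbwlt : (tokens.reverse.takeWhile isBadToken).length < tokens.length := by
      have hle : (tokens.reverse.takeWhile isBadToken).length
          + (tokens.reverse.dropWhile isBadToken).length = tokens.reverse.length := by
        rw [← List.length_append, List.takeWhile_append_dropWhile]
      have hpos : 0 < (tokens.reverse.dropWhile isBadToken).length :=
        List.length_pos_of_ne_nil hd
      simp at hle
      omega
    simp only [hd, if_false, htne]
    have hnneg : ¬ ((tokens.length : Int) - (tokens.reverse.takeWhile isBadToken).length < 0) := by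
      omega
    rw [if_neg hnneg, slice_run_eq tokens]
    simp [joinPhraseTokensA]
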